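-- pv_equiv track=rewrite | github.com/CodeAlexx/Eri-Rpg | erirpg/parsers/mojo.py | _extract_module_doc
-- ===== SOURCE A (Python) =====
-- def _extract_module_doc(source: str) -> str:
--     """Extract module-level docstring (triple-quoted at start)."""
--     # Check for triple-quoted string at start
--     source = source.lstrip()
--     if source.startswith('"""'):
--         end = source.find('"""', 3)
--         if end != -1:
--             doc = source[3:end].strip()
--             return doc.split("\n")[0][:100] if doc else ""
--     elif source.startswith("'''"):
--         end = source.find("'''", 3)
--         if end != -1:
--             doc = source[3:end].strip()
--             return doc.split("\n")[0][:100] if doc else ""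
--
--     # Check for # comments at start
--     lines = source.split("\n")
--     doc_lines = []
--     for line in lines:
--         line = line.strip()
--         if line.startswith("#"):
--             doc_lines.append(line[1:].strip())
--         elif line == "":
--             continue
--         else:
--             break
--
--     return doc_lines[0][:100] if doc_lines else ""
-- ===== SOURCE B (Python) =====
-- import re
--
-- _DOC_RE = re.compile(r'\s*(?:"""(.*?)"""|\'\'\'(.*?)\'\'\')', re.DOTALL)
--
-- def _extract_module_doc(source: str) -> str:
--     """Extract module-level docstring (triple-quoted at start)."""
--     m = _DOC_RE.match(source)
--     if m:
--         doc = (m.group(1) if m.group(1) is not None else m.group(2)).strip()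
--         return doc.split("\n")[0][:100] if doc else ""
--     # No docstring: the answer is decided by the FIRST non-blank line alone —
--     # it is a leading comment iff it starts with '#'.
--     first = next((t for t in (ln.strip() for ln in source.lstrip().split("\n")) if t), "")
--     return first[1:].strip()[:100] if first.startswith("#") else ""
-- ===== Notes on version B (the rewrite author's own statement) =====
-- stated objective: idiomatic
-- what changed: B extracts the docstring with a single anchored regex (re.match with non-greedy groups for both quote styles) instead of A's manual startswith/find branches, and replaces A's loop that accumulates every leading comment line into a list with a single first-non-blank-line test (next over a generator): the answer is a comment iff the first non-blank line starts with '#'.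
import Mathlib
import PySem

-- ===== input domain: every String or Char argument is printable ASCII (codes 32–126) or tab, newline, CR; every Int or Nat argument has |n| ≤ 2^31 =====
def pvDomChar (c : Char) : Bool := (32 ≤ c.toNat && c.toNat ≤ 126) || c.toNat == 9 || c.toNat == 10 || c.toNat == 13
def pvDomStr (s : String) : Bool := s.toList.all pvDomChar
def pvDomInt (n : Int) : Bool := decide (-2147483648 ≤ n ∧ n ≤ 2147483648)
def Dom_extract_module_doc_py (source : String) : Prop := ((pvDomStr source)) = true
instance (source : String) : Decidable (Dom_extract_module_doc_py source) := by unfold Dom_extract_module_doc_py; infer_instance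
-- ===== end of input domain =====

-- B replaces A's manual startswith/find docstring branches by one anchored regex match
-- and A's accumulate-all-comment-lines loop by a single first-non-blank-line test; same values.

-- ===== PORT A =====
-- the comment-scan loop: doc_lines accumulated across the lines, with break
def aLoop : List (List Char) → List (List Char) → List (List Char)
  | [], acc => acc
  | l :: ls, acc =>
      let line := PySem.Chars.strip l
      if PySem.Chars.startswith line ['#'] then
        aLoop ls (acc ++ [PySem.Chars.strip (PySem.Chars.slice line (some 1) none)])
      else if line = [] then aLoop ls acc
      else acc

-- "# comments at start" part: doc_lines[0][:100] if doc_lines else ""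
def aComments (s : List Char) : List Char :=
  match aLoop (PySem.Chars.splitOn s ['\n']) [] with
  | [] => []
  | d :: _ => PySem.Chars.slice d none (some 100)

def extract_module_doc_py (source : String) : String :=
  let s := PySem.Chars.lstrip source.toList
  String.ofList <|
    if PySem.Chars.startswith s ['"','"','"'] then
      let e := PySem.Chars.findFrom s ['"','"','"'] 3 none
      if e ≠ -1 then
        let doc := PySem.Chars.strip (PySem.Chars.slice s (some 3) (some e))
        if doc ≠ [] then
          PySem.Chars.slice ((PySem.Chars.splitOn doc ['\n']).headD []) none (some 100)
        else []
      else aComments s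
    else if PySem.Chars.startswith s ['\'','\'','\''] then
      let e := PySem.Chars.findFrom s ['\'','\'','\''] 3 none
      if e ≠ -1 then
        let doc := PySem.Chars.strip (PySem.Chars.slice s (some 3) (some e))
        if doc ≠ [] then
          PySem.Chars.slice ((PySem.Chars.splitOn doc ['\n']).headD []) none (some 100)
        else []
      else aComments s
    else aComments s

-- ===== PORT B =====
-- Exact port of _DOC_RE.match(source) for the anchored pattern
-- r'\s*(?:"""(.*?)"""|\'\'\'(.*?)\'\'\')' with DOTALL, returning the matched group:
-- '\s*' can only match the maximal whitespace prefix here (a shorter one leaves a whitespace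
-- char where a quote is required), which on this ASCII domain is Chars.lstrip; the alternation
-- tries the '"""' arm first; non-greedy '(.*?)' followed by the closing delimiter matches up
-- to the FIRST later occurrence of the delimiter, which is Chars.find on the suffix.
def bMatch (s : List Char) : Option (List Char) :=
  let t := PySem.Chars.lstrip s
  if PySem.Chars.startswith t ['"','"','"'] then
    let f := PySem.Chars.find (t.drop 3) ['"','"','"']
    if f ≠ -1 then some ((t.drop 3).take f.toNat) else none
  else if PySem.Chars.startswith t ['\'','\'','\''] then
    let f := PySem.Chars.find (t.drop 3) ['\'','\'','\'']
    if f ≠ -1 then some ((t.drop 3).take f.toNat) else none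
  else none

-- next((t for t in (ln.strip() for ln in …) if t), ""): the first non-blank stripped line
def firstNonblank : List (List Char) → List Char
  | [] => []
  | l :: ls =>
      let t := PySem.Chars.strip l
      if t ≠ [] then t else firstNonblank ls

def extract_module_doc_py_alt (source : String) : String :=
  String.ofList <|
    match bMatch source.toList with
    | some g =>
        let doc := PySem.Chars.strip g
        if doc ≠ [] then
          PySem.Chars.slice ((PySem.Chars.splitOn doc ['\n']).headD []) none (some 100)
        else []
    | none =>
        let first := firstNonblank (PySem.Chars.splitOn (PySem.Chars.lstrip source.toList) ['\n'])
        if PySem.Chars.startswith first ['#'] then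
          PySem.Chars.slice (PySem.Chars.strip (PySem.Chars.slice first (some 1) none)) none (some 100)
        else []

-- ===== PRECONDITION & SPEC =====
def Spec_extract_module_doc_py (source : String) (out : String) : Prop := out = extract_module_doc_py_alt source
instance (source : String) (out : String) : Decidable (Spec_extract_module_doc_py source out) := by unfold Spec_extract_module_doc_py; infer_instance

-- ===== CLAIM (what is proved, stated in full; the proofs are below) =====
def Claim_equal_extract_module_doc_py : Prop := ∀ (source : String), Dom_extract_module_doc_py source → Spec_extract_module_doc_py source (extract_module_doc_py source)

-- ===== LEMMAS AND PROOFS =====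

-- B's fallback expression over an already-lstripped list, for the lemmas below
def bComments (s : List Char) : List Char :=
  let first := firstNonblank (PySem.Chars.splitOn s ['\n'])
  if PySem.Chars.startswith first ['#'] then
    PySem.Chars.slice (PySem.Chars.strip (PySem.Chars.slice first (some 1) none)) none (some 100)
  else []

theorem aLoop_append (ls : List (List Char)) (acc : List (List Char)) :
    aLoop ls acc = acc ++ aLoop ls [] := by
  induction ls generalizing acc with
  | nil => simp [aLoop]
  | cons l ls ih =>
      simp only [aLoop, List.nil_append]
      split_ifs
      · rw [ih (acc ++ [_]), ih [_], List.append_assoc]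
      · rw [ih]
      · simp

-- A's accumulated doc_lines[0][:100] is B's first-non-blank-line test
theorem comments_eq (s : List Char) : aComments s = bComments s := by
  unfold aComments bComments
  generalize PySem.Chars.splitOn s ['\n'] = ls
  induction ls with
  | nil => simp [aLoop, firstNonblank, PySem.Chars.startswith]
  | cons l ls ih =>
      simp only [aLoop, firstNonblank]
      by_cases hnil : PySem.Chars.strip l = []
      · have hh : ¬ PySem.Chars.startswith (PySem.Chars.strip l) ['#'] = true := by
          rw [hnil]; simp [PySem.Chars.startswith]
        rw [if_neg hh, if_pos hnil, if_neg (not_not_intro hnil)]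
        exact ih
      · by_cases hh : PySem.Chars.startswith (PySem.Chars.strip l) ['#'] = true
        · rw [if_pos hh, aLoop_append, if_pos hnil, if_pos hh]
          simp
        · rw [if_neg hh, if_neg hnil, if_pos hnil, if_neg hh]

-- the quote branch: A's findFrom-from-3 value equals B's find on the dropped suffix
theorem quote_branch_eq (s q : List Char) (hq : q.length = 3)
    (hpre : PySem.Chars.startswith s q = true) :
    (if PySem.Chars.findFrom s q 3 none ≠ -1 then
        (let doc := PySem.Chars.strip (PySem.Chars.slice s (some 3) (some (PySem.Chars.findFrom s q 3 none)))
         if doc ≠ [] then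
           PySem.Chars.slice ((PySem.Chars.splitOn doc ['\n']).headD []) none (some 100)
         else [])
      else aComments s)
    =
    (match (if PySem.Chars.find (s.drop 3) q ≠ -1 then some ((s.drop 3).take (PySem.Chars.find (s.drop 3) q).toNat) else none : Option (List Char)) with
     | some g =>
        (let doc := PySem.Chars.strip g
         if doc ≠ [] then
           PySem.Chars.slice ((PySem.Chars.splitOn doc ['\n']).headD []) none (some 100)
         else [])
     | none => bComments s) := by
  have hlen : 3 ≤ s.length := by
    have h := (PySem.Chars.startswith_iff s q).mp hpre
    have := h.length_le
    omega
  have hff := PySem.Chars.findFrom_natCast s q 3 hlen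
  norm_num at hff
  rw [hff]
  set f := PySem.Chars.find (s.drop 3) q with hf
  by_cases hneg : f = -1
  · simp [hneg, comments_eq]
  · have hf0 : 0 ≤ f := by
      have := PySem.Chars.neg_one_le_find (s.drop 3) q
      rw [← hf] at this
      omega
    have hfle : f ≤ (s.drop 3).length := by
      have := PySem.Chars.find_le_length (s.drop 3) q
      rw [← hf] at this; exact this
    have h3f : (3 : Int) + f ≠ -1 := by omega
    rw [if_neg hneg, if_pos h3f, if_pos hneg]
    have hA : PySem.Chars.slice s (some 3) (some (3 + f)) = (s.drop 3).take f.toNat := by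
      have h' := PySem.List.slice_of_nonneg s (a := (3:Int)) (b := 3 + f)
        (by omega) (by omega) (by exact_mod_cast hlen) (by simp at hfle; omega)
      have ht : ((3:Int) + f).toNat - 3 = f.toNat := by omega
      simpa [ht] using h'
    rw [hA]

theorem extract_module_doc_py_eq (source : String) :
    extract_module_doc_py source = extract_module_doc_py_alt source := by
  simp only [extract_module_doc_py, extract_module_doc_py_alt, bMatch]
  generalize PySem.Chars.lstrip source.toList = s
  by_cases h1 : PySem.Chars.startswith s ['"','"','"'] = true
  · rw [if_pos h1, if_pos h1]
    exact congrArg String.ofList (quote_branch_eq s _ rfl h1)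
  · rw [if_neg h1, if_neg h1]
    by_cases h2 : PySem.Chars.startswith s ['\'','\'','\''] = true
    · rw [if_pos h2, if_pos h2]
      exact congrArg String.ofList (quote_branch_eq s _ rfl h2)
    · rw [if_neg h2, if_neg h2]
      exact congrArg String.ofList (comments_eq s)

-- ===== VERDICT (by name: the statement is the Claim_ definition above) =====
theorem extract_module_doc_py_spec : Claim_equal_extract_module_doc_py := by
  intro source _
  unfold Spec_extract_module_doc_py
  exact (extract_module_doc_py_eq source)
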